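-- pv_equiv track=rewrite | github.com/Iskandeur/lukin-e-nimi-kon | cipher_analyzer.py | apply_substitution
-- ===== SOURCE A (Python) =====
-- def apply_substitution(text, substitution):
--     """Apply substitution mapping to text."""
--     result = ""
--     for char in text:
--         if char.lower() in substitution:
--             new_char = substitution[char.lower()]
--             if isinstance(new_char, str):
--                 result += new_char.upper() if char.isupper() else new_char
--             else:
--                 result += char
--         else:
--             result += char
--     return result
-- ===== SOURCE B (Python) =====
-- def apply_substitution(text, substitution):
--     """Apply substitution mapping to text."""
--     table = {}
--     for key, rep in substitution.items():
--         if not isinstance(rep, str) or len(key) != 1 or key != key.lower():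
--             continue
--         table.setdefault(ord(key), rep)
--         if key.upper() != key:
--             table.setdefault(ord(key.upper()), rep.upper())
--     return text.translate(table)
-- ===== Notes on version B (the rewrite author's own statement) =====
-- stated objective: idiomatic
-- what changed: B precomputes a translation table (ord(key) -> replacement, plus an uppercase slot per lowercase-letter key, first insertion winning) from the substitution dict once and then applies str.translate in a single bulk pass, instead of A's per-character lower()/membership/branching loop with string concatenation over the text.
import Mathlib
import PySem

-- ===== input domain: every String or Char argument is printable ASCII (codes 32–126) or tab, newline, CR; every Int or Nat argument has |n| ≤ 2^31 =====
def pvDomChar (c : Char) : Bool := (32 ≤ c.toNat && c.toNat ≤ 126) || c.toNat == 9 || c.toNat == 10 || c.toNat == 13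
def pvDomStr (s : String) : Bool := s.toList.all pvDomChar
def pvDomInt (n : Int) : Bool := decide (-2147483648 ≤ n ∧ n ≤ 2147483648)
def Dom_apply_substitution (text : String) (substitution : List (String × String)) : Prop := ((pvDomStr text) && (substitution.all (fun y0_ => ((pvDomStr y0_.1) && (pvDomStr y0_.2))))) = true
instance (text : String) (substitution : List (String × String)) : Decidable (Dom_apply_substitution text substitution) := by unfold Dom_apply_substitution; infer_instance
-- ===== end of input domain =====

-- B replaces A's per-character if/else loop by a translation table built once from the
-- substitution dict followed by a single str.translate pass (objective: idiomatic).

-- ===== PORT A =====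
-- literal transliteration of A: one fold over the text, looking the lowered character
-- up in the substitution dict (first match, as for the assoc-list dict model) each time.
def apply_substitution (text : String) (substitution : List (String × String)) : String :=
  String.ofList (text.toList.foldl (fun result char =>
    match (PySem.Dict.mk substitution).get? (PySem.Str.lower (String.ofList [char])) with
    | some new_char =>
        result ++ (if PySem.Chars.isupper char then (PySem.Str.upper new_char).toList
                   else new_char.toList)
    | none => result ++ [char]) [])

-- ===== PORT B =====
-- one step of Source B's table-building loop: keys that are a single, already-lowercase
-- character get a slot at ord(key) (first insertion wins: dict.setdefault), and a second
-- slot at ord(key.upper()) when that differs; all other keys are skipped.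
def pvStep (table : PySem.Dict Int String) (kv : String × String) : PySem.Dict Int String :=
  match kv.1.toList with
  | [k] =>
      if PySem.Chars.lowerChar k = k then
        let t := table.setdefault (Int.ofNat k.toNat) kv.2
        if PySem.Chars.upperChar k ≠ k then
          t.setdefault (Int.ofNat (PySem.Chars.upperChar k).toNat) (PySem.Str.upper kv.2)
        else t
      else table
  | _ => table

def pvTable (substitution : List (String × String)) : PySem.Dict Int String :=
  substitution.foldl pvStep PySem.Dict.empty

-- text.translate(table): each character is replaced by table[ord(c)] when present,
-- kept otherwise, and the pieces are concatenated.
def apply_substitution_alt (text : String) (substitution : List (String × String)) : String :=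
  let table := pvTable substitution
  String.ofList ((text.toList.map
    (fun c => (table.getD (Int.ofNat c.toNat) (String.ofList [c])).toList)).flatten)

-- ===== PRECONDITION & SPEC =====
def Spec_apply_substitution (text : String) (substitution : List (String × String)) (out : String) : Prop := out = apply_substitution_alt text substitution
instance (text : String) (substitution : List (String × String)) (out : String) : Decidable (Spec_apply_substitution text substitution out) := by unfold Spec_apply_substitution; infer_instance

-- ===== CLAIM (what is proved, stated in full; the proofs are below) =====
def Claim_equal_apply_substitution : Prop := ∀ (text : String) (substitution : List (String × String)), Dom_apply_substitution text substitution → Spec_apply_substitution text substitution (apply_substitution text substitution)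

-- ===== LEMMAS AND PROOFS =====

-- what A appends for one character
def pvRep (substitution : List (String × String)) (c : Char) : List Char :=
  match (PySem.Dict.mk substitution).get? (PySem.Str.lower (String.ofList [c])) with
  | some new_char =>
      if PySem.Chars.isupper c then (PySem.Str.upper new_char).toList else new_char.toList
  | none => [c]

-- char-level ASCII facts about PySem's lowerChar/upperChar
theorem pvToNat_inj {c d : Char} (h : c.toNat = d.toNat) : c = d := by
  rw [← Char.ofNat_toNat c, h, Char.ofNat_toNat]

theorem pvLe_iff (a c : Char) : (a ≤ c) ↔ a.toNat ≤ c.toNat := by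
  rw [Char.le_def, UInt32.le_iff_toNat_le]; exact Iff.rfl

theorem pvIsupper_iff (c : Char) :
    PySem.Chars.isupper c = true ↔ 65 ≤ c.toNat ∧ c.toNat ≤ 90 := by
  have h1 : ('A' : Char).toNat = 65 := rfl
  have h2 : ('Z' : Char).toNat = 90 := rfl
  simp [PySem.Chars.isupper, pvLe_iff, h1, h2]

theorem pvIslower_iff (c : Char) :
    PySem.Chars.islower c = true ↔ 97 ≤ c.toNat ∧ c.toNat ≤ 122 := by
  have h1 : ('a' : Char).toNat = 97 := rfl
  have h2 : ('z' : Char).toNat = 122 := rfl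
  simp [PySem.Chars.islower, pvLe_iff, h1, h2]

theorem pvToNat_lower (c : Char) :
    (PySem.Chars.lowerChar c).toNat =
      if 65 ≤ c.toNat ∧ c.toNat ≤ 90 then c.toNat + 32 else c.toNat := by
  unfold PySem.Chars.lowerChar
  by_cases h : 65 ≤ c.toNat ∧ c.toNat ≤ 90
  · rw [if_pos ((pvIsupper_iff c).mpr h), if_pos h, Char.toNat_ofNat,
      if_pos (Or.inl (by omega))]
  · rw [if_neg (fun hu => h ((pvIsupper_iff c).mp hu)), if_neg h]

theorem pvToNat_upper (c : Char) :
    (PySem.Chars.upperChar c).toNat =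
      if 97 ≤ c.toNat ∧ c.toNat ≤ 122 then c.toNat - 32 else c.toNat := by
  unfold PySem.Chars.upperChar
  by_cases h : 97 ≤ c.toNat ∧ c.toNat ≤ 122
  · rw [if_pos ((pvIslower_iff c).mpr h), if_pos h, Char.toNat_ofNat,
      if_pos (Or.inl (by omega))]
  · rw [if_neg (fun hu => h ((pvIslower_iff c).mp hu)), if_neg h]

-- string-level key facts
theorem pvKey_eq (k : String) (l : List Char) : k = String.ofList l ↔ k.toList = l := by
  constructor
  · intro h; rw [h, String.toList_ofList]
  · intro h; apply String.toList_inj.mp; rw [h, String.toList_ofList]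

theorem pvLower_single (c : Char) :
    PySem.Str.lower (String.ofList [c]) = String.ofList [PySem.Chars.lowerChar c] := by
  simp [PySem.Str.lower, PySem.Chars.lower, String.toList_ofList]

-- setdefault only fills holes: looking up after a setdefault is "first the old dict,
-- then the freshly set slot"
theorem pvGet?_setdefault (d : PySem.Dict Int String) (k : Int) (v : String) (i : Int) :
    (d.setdefault k v).get? i =
      (d.get? i).or ((PySem.Dict.empty.setdefault k v).get? i) := by
  by_cases h : i = k
  · subst h
    rw [PySem.Dict.get?_setdefault_self, PySem.Dict.get?_setdefault_self]
    cases hd : d.get? i <;> simp [PySem.Dict.get?_empty]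
  · rw [PySem.Dict.get?_setdefault_of_ne _ _ h,
      PySem.Dict.get?_setdefault_of_ne _ _ h]
    simp [PySem.Dict.get?_empty]

theorem pvGet?_step (table : PySem.Dict Int String) (kv : String × String) (i : Int) :
    (pvStep table kv).get? i = (table.get? i).or ((pvStep PySem.Dict.empty kv).get? i) := by
  rcases kv with ⟨k, v⟩
  rcases hk : k.toList with _ | ⟨kc, _ | ⟨kc2, rest⟩⟩ <;>
    simp only [pvStep, hk]
  · cases table.get? i <;> simp [PySem.Dict.get?_empty]
  · by_cases hl : PySem.Chars.lowerChar kc = kc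
    · rw [if_pos hl, if_pos hl]
      by_cases hu : PySem.Chars.upperChar kc = kc
      · rw [if_neg (by simp [hu]), if_neg (by simp [hu]), pvGet?_setdefault]
      · rw [if_pos hu, if_pos hu,
          pvGet?_setdefault (d := table.setdefault (Int.ofNat kc.toNat) v),
          pvGet?_setdefault (d := table),
          pvGet?_setdefault
            (d := PySem.Dict.empty.setdefault (Int.ofNat kc.toNat) v),
          Option.or_assoc]
    · rw [if_neg hl, if_neg hl]
      cases table.get? i <;> simp [PySem.Dict.get?_empty]
  · cases table.get? i <;> simp [PySem.Dict.get?_empty]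

theorem pvGet?_foldl (sub : List (String × String)) (table : PySem.Dict Int String)
    (i : Int) :
    (sub.foldl pvStep table).get? i = (table.get? i).or ((pvTable sub).get? i) := by
  induction sub generalizing table with
  | nil => simp [pvTable, PySem.Dict.empty, PySem.Dict.get?]
  | cons kv rest ih =>
      simp only [pvTable, List.foldl_cons]
      rw [ih, ih (pvStep PySem.Dict.empty kv), pvGet?_step, Option.or_assoc]

-- one substitution entry, seen through the table, behaves exactly like A's dict probe
theorem pvStep_single (k v : String) (c : Char) :
    (pvStep PySem.Dict.empty (k, v)).get? (Int.ofNat c.toNat) =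
      if k = PySem.Str.lower (String.ofList [c])
      then some (if PySem.Chars.isupper c then PySem.Str.upper v else v)
      else none := by
  have hkey : (k = PySem.Str.lower (String.ofList [c])) ↔
      k.toList = [PySem.Chars.lowerChar c] := by
    rw [pvLower_single, pvKey_eq]
  rcases hk : k.toList with _ | ⟨kc, _ | ⟨kc2, rest⟩⟩ <;>
    simp only [pvStep, hk]
  · rw [if_neg (by simp [hkey, hk]), PySem.Dict.get?_empty]
  · -- single-character key
    have hkey' : (k = PySem.Str.lower (String.ofList [c])) ↔
        kc = PySem.Chars.lowerChar c := by
      rw [hkey, hk]; simp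
    have hLc := pvToNat_lower c
    have hLk := pvToNat_lower kc
    have hUk := pvToNat_upper kc
    have hup := pvIsupper_iff c
    by_cases hl : PySem.Chars.lowerChar kc = kc
    · rw [if_pos hl]
      have hkcnat : ¬ (65 ≤ kc.toNat ∧ kc.toNat ≤ 90) := by
        intro hr
        have := congrArg Char.toNat hl
        rw [hLk, if_pos hr] at this; omega
      by_cases hu : PySem.Chars.upperChar kc = kc
      · -- non-letter key: a single table slot at ord kc
        rw [if_neg (by simp [hu])]
        have hkcnl : ¬ (97 ≤ kc.toNat ∧ kc.toNat ≤ 122) := by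
          intro hr
          have := congrArg Char.toNat hu
          rw [hUk, if_pos hr] at this; omega
        have hD : PySem.Dict.empty.setdefault (Int.ofNat kc.toNat) v =
            PySem.Dict.mk [(Int.ofNat kc.toNat, v)] := by
          simp [PySem.Dict.setdefault, PySem.Dict.contains, PySem.Dict.empty]
        rw [hD, PySem.Dict.get?_mk_cons]
        by_cases h1 : c = kc
        · subst h1
          rw [if_pos (by simp), if_pos (hkey'.mpr hl.symm)]
          have : ¬ PySem.Chars.isupper c = true := by rw [hup]; omega
          simp [this]
        · rw [if_neg (by simp; intro h; exact h1 (pvToNat_inj h.symm))]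
          rw [if_neg (fun hkeq => by
            have := congrArg Char.toNat (hkey'.mp hkeq)
            rw [hLc] at this
            by_cases hcu : 65 ≤ c.toNat ∧ c.toNat ≤ 90
            · rw [if_pos hcu] at this; omega
            · rw [if_neg hcu] at this
              exact h1 (pvToNat_inj (by omega)))]
          simp [PySem.Dict.get?]
      · -- lowercase-letter key: two table slots, ord kc and ord (upper kc)
        rw [if_pos hu]
        have hkclow : 97 ≤ kc.toNat ∧ kc.toNat ≤ 122 := by
          by_contra hr
          exact hu (pvToNat_inj (by rw [hUk, if_neg hr]))
        have hUnat : (PySem.Chars.upperChar kc).toNat = kc.toNat - 32 := by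
          rw [hUk, if_pos hkclow]
        have hab : (Int.ofNat kc.toNat) ≠ (Int.ofNat (PySem.Chars.upperChar kc).toNat) := by
          intro h
          have h' : kc.toNat = (PySem.Chars.upperChar kc).toNat := Int.ofNat_inj.mp h
          rw [hUnat] at h'
          omega
        have hD : (PySem.Dict.empty.setdefault (Int.ofNat kc.toNat) v).setdefault
              (Int.ofNat (PySem.Chars.upperChar kc).toNat) (PySem.Str.upper v) =
            PySem.Dict.mk [(Int.ofNat kc.toNat, v),
              (Int.ofNat (PySem.Chars.upperChar kc).toNat, PySem.Str.upper v)] := by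
          simp [PySem.Dict.setdefault, PySem.Dict.contains, PySem.Dict.empty]
          rw [hUnat]; omega
        rw [hD, PySem.Dict.get?_mk_cons, PySem.Dict.get?_mk_cons]
        by_cases h1 : c = kc
        · subst h1
          rw [if_pos (by simp), if_pos (hkey'.mpr hl.symm)]
          have : ¬ PySem.Chars.isupper c = true := by rw [hup]; omega
          simp [this]
        · rw [if_neg (by simp; intro h; exact h1 (pvToNat_inj h.symm))]
          by_cases h2 : c = PySem.Chars.upperChar kc
          · rw [if_pos (by simp [h2])]
            have hcnat : c.toNat = kc.toNat - 32 := by rw [h2, hUnat]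
            have hcup : PySem.Chars.isupper c = true := by rw [hup]; omega
            have hlow : kc = PySem.Chars.lowerChar c := by
              apply pvToNat_inj
              rw [hLc, if_pos (by omega)]; omega
            rw [if_pos (hkey'.mpr hlow), hcup]
            simp
          · rw [if_neg (by simp; intro h; exact h2 (pvToNat_inj h.symm))]
            rw [if_neg (fun hkeq => by
              have := congrArg Char.toNat (hkey'.mp hkeq)
              rw [hLc] at this
              by_cases hcu : 65 ≤ c.toNat ∧ c.toNat ≤ 90
              · rw [if_pos hcu] at this
                exact h2 (pvToNat_inj (by rw [hUnat]; omega))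
              · rw [if_neg hcu] at this
                exact h1 (pvToNat_inj (by omega)))]
            simp [PySem.Dict.get?]
    · rw [if_neg hl]
      have hkcup : 65 ≤ kc.toNat ∧ kc.toNat ≤ 90 := by
        by_contra hr
        exact hl (pvToNat_inj (by rw [hLk, if_neg hr]))
      rw [if_neg (fun hkeq => by
        have := congrArg Char.toNat (hkey'.mp hkeq)
        rw [hLc] at this
        by_cases hcu : 65 ≤ c.toNat ∧ c.toNat ≤ 90
        · rw [if_pos hcu] at this; omega
        · rw [if_neg hcu] at this; omega)]
      rw [PySem.Dict.get?_empty]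
  · rw [if_neg (by simp [hkey, hk]), PySem.Dict.get?_empty]

-- the whole table agrees with A's dict probe, character by character
theorem pvTable_get? (sub : List (String × String)) (c : Char) :
    (pvTable sub).get? (Int.ofNat c.toNat) =
      Option.map (fun v => if PySem.Chars.isupper c then PySem.Str.upper v else v)
        ((PySem.Dict.mk sub).get? (PySem.Str.lower (String.ofList [c]))) := by
  induction sub with
  | nil => simp [pvTable, PySem.Dict.empty, PySem.Dict.get?]
  | cons kv rest ih =>
      rcases kv with ⟨k, v⟩
      have hcons : pvTable ((k, v) :: rest) = rest.foldl pvStep (pvStep PySem.Dict.empty (k, v)) := rfl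
      rw [hcons, pvGet?_foldl, ih, pvStep_single,
        PySem.Dict.get?_mk_cons]
      by_cases h : k = PySem.Str.lower (String.ofList [c])
      · simp [h]
      · simp [h]

theorem pvChar_eq (sub : List (String × String)) (c : Char) :
    ((pvTable sub).getD (Int.ofNat c.toNat) (String.ofList [c])).toList = pvRep sub c := by
  rw [PySem.Dict.getD_eq_get?_getD, pvTable_get?, pvRep]
  cases h : (PySem.Dict.mk sub).get? (PySem.Str.lower (String.ofList [c])) with
  | none => simp [String.toList_ofList]
  | some v => by_cases hu : PySem.Chars.isupper c <;> simp [hu]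

-- ===== VERDICT (by name: the statement is the Claim_ definition above) =====
theorem apply_substitution_spec : Claim_equal_apply_substitution := by
  intro text substitution _
  unfold Spec_apply_substitution apply_substitution apply_substitution_alt
  congr 1
  have hf : (fun (result : List Char) (char : Char) =>
      match (PySem.Dict.mk substitution).get?
          (PySem.Str.lower (String.ofList [char])) with
      | some new_char =>
          result ++ (if PySem.Chars.isupper char then (PySem.Str.upper new_char).toList
                     else new_char.toList)
      | none => result ++ [char]) =
      (fun result c => result ++ pvRep substitution c) := by
    funext acc x
    cases h : (PySem.Dict.mk substitution).get?
        (PySem.Str.lower (String.ofList [x])) <;>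
      simp [pvRep, h]
  rw [hf, PySem.List.foldl_append_eq_flatMap]
  simp only [pvChar_eq]
  simp [List.flatMap_def]
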